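-- pv_equiv track=rewrite | github.com/jpolache/codewars | eb.py | beggars
-- ===== SOURCE A (Python) =====
-- def beggars(values, n):
--     op = []
--     for i in range(n): # list
--         o_val = 0
--         for val in (values[i::n]): #sublist
--             o_val += val
--         op.append(o_val)
--     return op
-- ===== SOURCE B (Python) =====
-- def beggars(values, n):
--     if n <= 0:
--         return []
--     op = [0] * n
--     for idx, val in enumerate(values):
--         op[idx % n] += val
--     return op
-- ===== Notes on version B (the rewrite author's own statement) =====
-- stated objective: alternative
-- what changed: Single enumerate pass scattering each element into its index-mod-n bucket, replacing n gather passes each built from a slice values[i::n].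
import Mathlib
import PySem

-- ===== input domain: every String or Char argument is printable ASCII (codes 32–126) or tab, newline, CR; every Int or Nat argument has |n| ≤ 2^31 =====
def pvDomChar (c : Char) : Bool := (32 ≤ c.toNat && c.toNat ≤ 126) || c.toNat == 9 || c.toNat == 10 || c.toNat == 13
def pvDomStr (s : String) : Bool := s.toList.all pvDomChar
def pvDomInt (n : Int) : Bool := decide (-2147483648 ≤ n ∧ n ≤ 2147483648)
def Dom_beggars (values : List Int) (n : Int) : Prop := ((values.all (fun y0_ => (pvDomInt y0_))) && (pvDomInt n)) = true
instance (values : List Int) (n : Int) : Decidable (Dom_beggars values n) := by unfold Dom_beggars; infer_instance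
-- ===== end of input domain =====

-- B replaces A's n gather passes over slices values[i::n] by one enumerate pass
-- scattering each element into bucket idx % n (objective: alternative — a genuinely
-- different single-traversal algorithm of the same cost).

-- ===== PORT A =====
-- values[i::n]: inside the loop i ∈ range(n) forces 0 < n, so the step is never 0 and
-- slice? is always `some`; the `.getD []` default is unreachable.
def beggars (values : List Int) (n : Int) : List Int :=
  (PySem.List.pyRange 0 n 1).foldl
    (fun op i =>
      op ++ [((PySem.List.slice? values (some i) none n).getD []).foldl
               (fun o_val val => o_val + val) 0])
    []

-- ===== PORT B =====
def beggars_alt (values : List Int) (n : Int) : List Int :=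
  if n ≤ 0 then []
  else
    (PySem.List.enumerate values 0).foldl
      (fun op p =>
        PySem.List.pySetD op (PySem.Int.mod p.1 n)
          (PySem.List.pyGetD op (PySem.Int.mod p.1 n) 0 + p.2))
      (List.replicate n.toNat 0)

-- ===== PRECONDITION & SPEC =====
def Spec_beggars (values : List Int) (n : Int) (out : List Int) : Prop := out = beggars_alt values n
instance (values : List Int) (n : Int) (out : List Int) : Decidable (Spec_beggars values n out) := by unfold Spec_beggars; infer_instance

-- ===== CLAIM (what is proved, stated in full; the proofs are below) =====
def Claim_equal_beggars : Prop := ∀ (values : List Int) (n : Int), Dom_beggars values n → Spec_beggars values n (beggars values n)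

-- ===== LEMMAS AND PROOFS =====

-- sum of the elements at indices j, j+(m+1), j+2(m+1), … of xs (index form of a step-(m+1) slice)
def sIdx (xs : List Int) (j m : Nat) : List Int :=
  if h : j < xs.length then xs[j] :: sIdx xs (j + m + 1) m else []
termination_by xs.length - j
decreasing_by omega

-- countdown form of the same selection, structural on the list
def stridedF : List Int → Int → Int → List Int
  | [], _, _ => []
  | v :: vs, c, n => if c = 0 then v :: stridedF vs (n - 1) n else stridedF vs (c - 1) n

-- sum of the elements of vs whose global position (starting at s) is ≡ r (mod n)
def msum : List Int → Int → Int → Int → Int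
  | [], _, _, _ => 0
  | v :: vs, s, r, n => (if PySem.Int.mod s n = r then v else 0) + msum vs (s + 1) r n

lemma sIdx_nil (j m : Nat) : sIdx [] j m = [] := by
  rw [sIdx]; simp

lemma sIdx_cons (x : Int) (xs : List Int) (m : Nat) :
    ∀ j, sIdx (x :: xs) (j + 1) m = sIdx xs j m := by
  intro j
  induction hm : xs.length - j using Nat.strong_induction_on generalizing j with
  | _ k ih =>
    conv_lhs => rw [sIdx]
    conv_rhs => rw [sIdx]
    by_cases h : j < xs.length
    · rw [dif_pos (by simp; omega), dif_pos h]
      simp only [List.getElem_cons_succ]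
      have : sIdx (x :: xs) (j + m + 1 + 1) m = sIdx xs (j + m + 1) m := by
        subst hm; exact ih (xs.length - (j + m + 1)) (by omega) (j + m + 1) rfl
      rw [show j + 1 + m + 1 = j + m + 1 + 1 by omega, this]
    · rw [dif_neg (by simp; omega), dif_neg h]

lemma stridedF_eq_sIdx (n : Int) (hn : 0 < n) :
    ∀ (xs : List Int) (c : Int), 0 ≤ c →
      stridedF xs c n = sIdx xs c.toNat (n.toNat - 1) := by
  intro xs
  induction xs with
  | nil => intro c _; rw [stridedF, sIdx_nil]
  | cons v vs ih =>
    intro c hc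
    by_cases h0 : c = 0
    · subst h0
      rw [stridedF, if_pos rfl, sIdx]
      rw [dif_pos (by simp)]
      simp only [Int.toNat_zero, List.getElem_cons_zero]
      have h1 : 0 + (n.toNat - 1) + 1 = (n - 1).toNat + 1 := by omega
      rw [h1, sIdx_cons, ih (n - 1) (by omega)]
    · rw [stridedF, if_neg h0, ih (c - 1) (by omega)]
      have h1 : c.toNat = (c - 1).toNat + 1 := by omega
      rw [h1, sIdx_cons]

lemma sum_stridedF_eq_msum (n : Int) (hn : 0 < n) (r : Int) (hr0 : 0 ≤ r) (hrn : r < n) :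
    ∀ (xs : List Int) (s : Int),
      (stridedF xs (PySem.Int.mod (r - s) n) n).sum = msum xs s r n := by
  intro xs
  induction xs with
  | nil => intro s; rw [stridedF, msum]; rfl
  | cons v vs ih =>
    intro s
    have hms := PySem.Int.mod_eq_emod_of_pos (a := s) hn
    by_cases hc : PySem.Int.mod (r - s) n = 0
    · -- s ≡ r (mod n), so this element is taken
      obtain ⟨k, hk⟩ := (PySem.Int.mod_eq_zero_iff_dvd _ _).mp hc
      have hsr : PySem.Int.mod s n = r := by
        rw [hms, show s = r + n * (-k) by linarith, Int.add_mul_emod_self_left,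
            Int.emod_eq_of_lt hr0 hrn]
      rw [stridedF, msum, if_pos hc, if_pos hsr, List.sum_cons]
      have harg : PySem.Int.mod (r - (s + 1)) n = n - 1 := by
        rw [PySem.Int.mod_eq_emod_of_pos hn,
            show r - (s + 1) = (n - 1) + n * (k - 1) by linarith,
            Int.add_mul_emod_self_left, Int.emod_eq_of_lt (by omega) (by omega)]
      rw [← harg, ih (s + 1)]
    · -- s ≢ r (mod n): element skipped
      have hpos : 0 < PySem.Int.mod (r - s) n := by
        have := PySem.Int.mod_nonneg (r - s) hn; omega
      have hlt := PySem.Int.mod_lt (r - s) hn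
      have hsr : ¬ PySem.Int.mod s n = r := by
        intro h
        apply hc
        rw [PySem.Int.mod_eq_emod_of_pos hn,
            show r - s = 0 + n * (-(s / n)) by
              rw [hms] at h; rw [← h]; have := Int.mul_ediv_add_emod s n; linarith,
            Int.add_mul_emod_self_left]
        simp
      rw [stridedF, msum, if_neg hc, if_neg hsr]
      rw [PySem.Int.mod_eq_emod_of_pos hn] at hpos hlt
      have harg : PySem.Int.mod (r - (s + 1)) n = PySem.Int.mod (r - s) n - 1 := by
        rw [PySem.Int.mod_eq_emod_of_pos (a := r - (s + 1)) hn,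
            PySem.Int.mod_eq_emod_of_pos (a := r - s) hn,
            show r - (s + 1) = ((r - s) % n - 1) + n * ((r - s) / n) by
              have := Int.emod_add_mul_ediv (r - s) n; linarith,
            Int.add_mul_emod_self_left, Int.emod_eq_of_lt (by omega) (by omega)]
      rw [← harg, ih (s + 1), zero_add]

-- the count in slice?'s stride formula decreases by exactly one per step of n
lemma filterMap_range_eq_sIdx (xs : List Int) (n : Int) (hn : 0 < n) :
    ∀ (c : Nat) (s : Nat),
      (c : Int) = (if (s : Int) < (xs.length : Int)
                   then ((xs.length : Int) - s + n - 1) / n else 0) →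
      List.filterMap (fun k : Nat => xs[((s : Int) + n * (k : Int)).toNat]?) (List.range c)
        = sIdx xs s (n.toNat - 1) := by
  intro c
  induction c with
  | zero =>
    intro s hs
    rw [sIdx, dif_neg, List.range_zero, List.filterMap_nil]
    by_contra h
    rw [if_pos (by omega)] at hs
    have : (1 : Int) ≤ ((xs.length : Int) - s + n - 1) / n := by
      rw [Int.le_ediv_iff_mul_le hn]; omega
    omega
  | succ c ih =>
    intro s hs
    have hslt : s < xs.length := by
      by_contra h
      rw [if_neg (by omega)] at hs; omega
    rw [if_pos (by omega)] at hs
    have hstep : ((xs.length : Int) - s + n - 1) / n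
        = ((xs.length : Int) - s - 1) / n + 1 := by
      rw [show (xs.length : Int) - s + n - 1 = ((xs.length : Int) - s - 1) + 1 * n by ring,
          Int.add_mul_ediv_right _ _ (by omega)]
    have hc : (c : Int) = (if ((s + n.toNat : Nat) : Int) < (xs.length : Int)
        then ((xs.length : Int) - (s + n.toNat : Nat) + n - 1) / n else 0) := by
      by_cases h2 : ((s + n.toNat : Nat) : Int) < (xs.length : Int)
      · rw [if_pos h2]
        rw [show (xs.length : Int) - ((s + n.toNat : Nat) : Int) + n - 1
              = (xs.length : Int) - s - 1 by push_cast; omega]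
        omega
      · rw [if_neg h2]
        have : ((xs.length : Int) - s - 1) / n = 0 :=
          Int.ediv_eq_zero_of_lt (by omega) (by push_cast at h2 ⊢; omega)
        omega
    have h0 : xs[((s : Int) + n * (((0 : Nat)) : Int)).toNat]? = some xs[s] := by
      rw [show ((s : Int) + n * (((0 : Nat)) : Int)).toNat = s by simp]
      exact List.getElem?_eq_getElem hslt
    rw [List.range_succ_eq_map]
    simp only [List.filterMap_cons, h0, List.filterMap_map]
    have hf : (fun k : Nat => xs[((s : Int) + n * ((k : Nat) : Int)).toNat]?) ∘ Nat.succ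
        = (fun k : Nat => xs[((((s + n.toNat : Nat)) : Int) + n * ((k : Nat) : Int)).toNat]?) := by
      funext k
      simp only [Function.comp]
      congr 2
      push_cast [Int.toNat_of_nonneg hn.le]
      ring_nf
    rw [hf, ih (s + n.toNat) hc]
    conv_rhs => rw [sIdx]
    rw [dif_pos hslt, show s + (n.toNat - 1) + 1 = s + n.toNat by omega]

-- the stride-n tail slice in index form
lemma slice_step_eq_sIdx (xs : List Int) (i n : Int) (hi : 0 ≤ i) (hn : 0 < n) :
    PySem.List.slice? xs (some i) none n = some (sIdx xs (min i.toNat xs.length) (n.toNat - 1)) := by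
  have hstart : min i (xs.length : Int) = ((min i.toNat xs.length : Nat) : Int) := by omega
  have hform : PySem.List.slice? xs (some i) none n = some (List.filterMap
      (fun k : Nat => xs[((min i (xs.length : Int)) + n * (k : Int)).toNat]?)
      (List.range (if min i (xs.length : Int) < (xs.length : Int)
        then (((xs.length : Int) - min i (xs.length : Int) + n - 1) / n).toNat else 0))) := by
    simp only [PySem.List.slice?, PySem.List.sliceIndices, if_neg (show ¬ n < 0 by omega),
      if_neg (show ¬ n = 0 by omega), if_neg (show ¬ i < 0 by omega), if_pos hn]
  rw [hform]
  congr 1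
  have hfun : (fun k : Nat => xs[((min i (xs.length : Int)) + n * (k : Int)).toNat]?)
      = (fun k : Nat => xs[((((min i.toNat xs.length : Nat)) : Int) + n * (k : Int)).toNat]?) := by
    funext k
    rw [hstart]
  rw [hfun]
  apply filterMap_range_eq_sIdx xs n hn
  by_cases h : ((min i.toNat xs.length : Nat) : Int) < (xs.length : Int)
  · rw [if_pos h, if_pos (by omega), hstart, Int.toNat_of_nonneg]
    apply Int.ediv_nonneg _ (by omega)
    omega
  · rw [if_neg h, if_neg (by omega)]
    rfl

lemma sIdx_min (xs : List Int) (j m : Nat) :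
    sIdx xs (min j xs.length) m = sIdx xs j m := by
  by_cases h : j < xs.length
  · rw [min_eq_left (by omega)]
  · conv_lhs => rw [sIdx]
    conv_rhs => rw [sIdx]
    rw [dif_neg (by omega), dif_neg (by omega)]

lemma getD_range_map (op : List Int) :
    (List.range op.length).map (fun r => op.getD r 0) = op := by
  apply List.ext_getElem
  · simp
  · intro i h1 h2
    simp [List.getElem?_eq_getElem h2]

lemma scat_eq (n : Int) (hn : 0 < n) :
    ∀ (vs : List Int) (s : Int) (op : List Int), op.length = n.toNat →
      List.foldl
        (fun op p =>
          PySem.List.pySetD op (PySem.Int.mod p.1 n)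
            (PySem.List.pyGetD op (PySem.Int.mod p.1 n) 0 + p.2))
        op (PySem.List.enumerate vs s)
      = (List.range n.toNat).map (fun r => op.getD r 0 + msum vs s (r : Int) n) := by
  intro vs
  induction vs with
  | nil =>
    intro s op hop
    simp only [PySem.List.enumerate, List.foldl_nil, msum, add_zero]
    rw [← hop, getD_range_map]
  | cons v vs ih =>
    intro s op hop
    rw [PySem.List.enumerate_cons, List.foldl_cons]
    have hm0 : 0 ≤ PySem.Int.mod s n := PySem.Int.mod_nonneg s hn
    have hmlt : PySem.Int.mod s n < n := PySem.Int.mod_lt s hn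
    set c : Nat := (PySem.Int.mod s n).toNat with hc
    have hclt : c < op.length := by omega
    have hset : PySem.List.pySetD op (PySem.Int.mod s n)
        (PySem.List.pyGetD op (PySem.Int.mod s n) 0 + v)
        = op.set c (op.getD c 0 + v) := by
      rw [PySem.List.pySetD_of_nonneg _ _ hm0, PySem.List.pyGetD_of_nonneg _ _ hm0]
    rw [hset, ih (s + 1) _ (by simp [hop])]
    apply List.map_congr_left
    intro r hr
    simp only [List.mem_range] at hr
    rw [msum]
    have hrlen : r < op.length := by omega
    by_cases hrc : r = c
    · rw [if_pos (show PySem.Int.mod s n = (r : Int) by omega), hrc,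
          List.getD_eq_getElem _ _ (by simpa using hclt),
          List.getElem_set_self (by simpa using hclt)]
      ring
    · rw [if_neg (show ¬ PySem.Int.mod s n = (r : Int) by omega),
          List.getD_eq_getElem _ _ (by simpa using hrlen),
          List.getD_eq_getElem _ _ hrlen, List.getElem_set_ne (by omega)]
      ring

-- ===== VERDICT (by name: the statement is the Claim_ definition above) =====
theorem beggars_spec : Claim_equal_beggars := by
  intro values n _
  unfold Spec_beggars beggars beggars_alt
  by_cases hn : n ≤ 0
  · rw [PySem.List.pyRange_one_eq_nil hn, if_pos hn]
    rfl
  · rw [if_neg hn]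
    have hn' : 0 < n := by omega
    rw [PySem.List.foldl_append_singleton_eq_map, List.nil_append]
    rw [scat_eq n hn' values 0 _ (by simp)]
    have hcast : n = ((n.toNat : Int)) := by omega
    rw [hcast, PySem.List.pyRange_zero_natCast, List.map_map]
    apply List.map_congr_left
    intro r hr
    simp only [List.mem_range] at hr
    simp only [Function.comp]
    rw [← hcast]
    rw [slice_step_eq_sIdx values (r : Int) n (by omega) hn']
    simp only [Option.getD_some]
    rw [Int.toNat_natCast, sIdx_min]
    rw [show sIdx values r (n.toNat - 1) = stridedF values (r : Int) n from by
          rw [stridedF_eq_sIdx n hn' values (r : Int) (by omega), Int.toNat_natCast]]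
    have h0 : PySem.Int.mod ((r : Int) - 0) n = (r : Int) := by
      rw [sub_zero, PySem.Int.mod_eq_emod_of_pos hn', Int.emod_eq_of_lt (by omega) (by omega)]
    have := sum_stridedF_eq_msum n hn' (r : Int) (by omega) (by omega) values 0
    rw [h0] at this
    rw [← this, List.sum_eq_foldl]
    simp [List.getD]
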